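-- pv_equiv track=rewrite | github.com/lokesh-2006-hub/image-emotion-analyzer | app.py | analyze_caption
-- ===== SOURCE A (Python) =====
-- def analyze_caption(caption):
--     """Simple rules to generate sentiment, emotion, and reason based on caption."""
--     caption_lower = caption.lower()
--
--     if any(word in caption_lower for word in ["smile", "happy", "bright"]):
--         sentiment = "Positive"
--         emotion = "Happiness"
--     elif any(word in caption_lower for word in ["sad", "dark", "lonely", "cry"]):
--         sentiment = "Negative"
--         emotion = "Sadness"
--     elif any(word in caption_lower for word in ["fight", "shield", "battle", "ready", "determination"]):
--         sentiment = "Neutral"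
--         emotion = "Determination"
--     else:
--         sentiment = "Neutral"
--         emotion = "Neutrality"
--
--     reason = f"The image shows {caption}. This suggests a feeling of {emotion.lower()} because of the elements present."
--
--     return sentiment, emotion, reason
-- ===== SOURCE B (Python) =====
-- KEYWORD_TIER = {
--     "smile": 0, "happy": 0, "bright": 0,
--     "sad": 1, "dark": 1, "lonely": 1, "cry": 1,
--     "fight": 2, "shield": 2, "battle": 2, "ready": 2, "determination": 2,
-- }
-- TIERS = [
--     ("Positive", "Happiness"),
--     ("Negative", "Sadness"),
--     ("Neutral", "Determination"),
--     ("Neutral", "Neutrality"),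
-- ]
--
--
-- def analyze_caption(caption):
--     caption_lower = caption.lower()
--     best = 3
--     for word, tier in KEYWORD_TIER.items():
--         if tier < best and word in caption_lower:
--             best = tier
--     sentiment, emotion = TIERS[best]
--     reason = f"The image shows {caption}. This suggests a feeling of {emotion.lower()} because of the elements present."
--     return sentiment, emotion, reason
-- ===== Notes on version B (the rewrite author's own statement) =====
-- stated objective: alternative
-- what changed: Replaces the ordered first-match if/elif chain by an exhaustive single pass over a flat keyword-to-tier map that keeps the minimum matching tier (arg-min), then indexes a tier table; correct because the chain's priority order equals the numeric tier order.
import Mathlib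
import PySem

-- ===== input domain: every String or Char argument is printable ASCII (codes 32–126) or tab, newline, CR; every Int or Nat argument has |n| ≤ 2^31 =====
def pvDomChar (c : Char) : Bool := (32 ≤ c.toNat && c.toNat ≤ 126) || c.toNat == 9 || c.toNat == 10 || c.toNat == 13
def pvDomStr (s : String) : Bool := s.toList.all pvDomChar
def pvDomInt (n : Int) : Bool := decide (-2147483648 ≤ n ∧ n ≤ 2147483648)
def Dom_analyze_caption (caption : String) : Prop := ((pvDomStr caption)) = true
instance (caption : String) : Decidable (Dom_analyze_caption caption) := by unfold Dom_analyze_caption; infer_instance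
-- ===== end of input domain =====

-- B replaces A's ordered if/elif first-match chain by one exhaustive pass over a flat
-- keyword→tier map keeping the minimum matching tier (objective: alternative).

-- ===== PORT A =====
def analyze_caption (caption : String) : String × String × String :=
  let caption_lower := PySem.Str.lower caption
  let se : String × String :=
    if ["smile", "happy", "bright"].any (fun w => PySem.Str.isIn w caption_lower) then
      ("Positive", "Happiness")
    else if ["sad", "dark", "lonely", "cry"].any (fun w => PySem.Str.isIn w caption_lower) then
      ("Negative", "Sadness")
    else if ["fight", "shield", "battle", "ready", "determination"].any (fun w => PySem.Str.isIn w caption_lower) then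
      ("Neutral", "Determination")
    else
      ("Neutral", "Neutrality")
  let reason := "The image shows " ++ caption ++ ". This suggests a feeling of " ++ PySem.Str.lower se.2 ++ " because of the elements present."
  (se.1, se.2, reason)

-- ===== PORT B =====
def pvKeywordTier : List (String × Nat) :=
  [("smile", 0), ("happy", 0), ("bright", 0),
   ("sad", 1), ("dark", 1), ("lonely", 1), ("cry", 1),
   ("fight", 2), ("shield", 2), ("battle", 2), ("ready", 2), ("determination", 2)]

def pvTiers : List (String × String) :=
  [("Positive", "Happiness"), ("Negative", "Sadness"),
   ("Neutral", "Determination"), ("Neutral", "Neutrality")]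

-- the Source B for-loop over KEYWORD_TIER.items() with accumulator `best`
def pvBestTier : List (String × Nat) → String → Nat → Nat
  | [], _, best => best
  | (w, t) :: rest, cl, best =>
      pvBestTier rest cl (if t < best && PySem.Str.isIn w cl then t else best)

def analyze_caption_alt (caption : String) : String × String × String :=
  let caption_lower := PySem.Str.lower caption
  let best := pvBestTier pvKeywordTier caption_lower 3
  let se := pvTiers.getD best ("Neutral", "Neutrality")  -- TIERS[best]; best ≤ 3 so in range
  let reason := "The image shows " ++ caption ++ ". This suggests a feeling of " ++ PySem.Str.lower se.2 ++ " because of the elements present."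
  (se.1, se.2, reason)

-- ===== PRECONDITION & SPEC =====
def Spec_analyze_caption (caption : String) (out : String × String × String) : Prop := out = analyze_caption_alt caption
instance (caption : String) (out : String × String × String) : Decidable (Spec_analyze_caption caption out) := by unfold Spec_analyze_caption; infer_instance

-- ===== CLAIM (what is proved, stated in full; the proofs are below) =====
def Claim_equal_analyze_caption : Prop := ∀ (caption : String), Dom_analyze_caption caption → Spec_analyze_caption caption (analyze_caption caption)

-- ===== LEMMAS AND PROOFS =====

theorem pvBestTier_append (xs ys : List (String × Nat)) (cl : String) (best : Nat) :
    pvBestTier (xs ++ ys) cl best = pvBestTier ys cl (pvBestTier xs cl best) := by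
  induction xs generalizing best with
  | nil => rfl
  | cons p rest ih => cases p; simp [pvBestTier, ih]

-- one tier group: the result is t iff t improves on best and some word matches
theorem pvBestTier_const (ws : List String) (t : Nat) (cl : String) (best : Nat) :
    pvBestTier (ws.map (fun w => (w, t))) cl best
      = if t < best ∧ ws.any (fun w => PySem.Str.isIn w cl) then t else best := by
  induction ws generalizing best with
  | nil => simp [pvBestTier]
  | cons w rest ih =>
    simp only [List.map_cons, pvBestTier, List.any_cons, Bool.or_eq_true, Bool.and_eq_true,
      decide_eq_true_eq]
    rw [ih]
    split_ifs <;> try rfl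
    all_goals exfalso
    all_goals try simp_all
    all_goals
      rename_i hall hex
      obtain ⟨-, x, hx, hxt⟩ := hex
      exact absurd hxt (by simp [hall x hx])

theorem pvKeywordTier_groups :
    pvKeywordTier
      = (["smile", "happy", "bright"].map (fun w => (w, 0)))
        ++ (["sad", "dark", "lonely", "cry"].map (fun w => (w, 1)))
        ++ (["fight", "shield", "battle", "ready", "determination"].map (fun w => (w, 2))) := rfl

-- ===== VERDICT (by name: the statement is the Claim_ definition above) =====
theorem analyze_caption_spec : Claim_equal_analyze_caption := by
  intro caption _
  unfold Spec_analyze_caption analyze_caption analyze_caption_alt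
  simp only [pvKeywordTier_groups, pvBestTier_append, pvBestTier_const]
  cases h1 : ["smile", "happy", "bright"].any (fun w => PySem.Str.isIn w (PySem.Str.lower caption)) <;>
  cases h2 : ["sad", "dark", "lonely", "cry"].any (fun w => PySem.Str.isIn w (PySem.Str.lower caption)) <;>
  cases h3 : ["fight", "shield", "battle", "ready", "determination"].any (fun w => PySem.Str.isIn w (PySem.Str.lower caption)) <;>
    simp [h1, h2, h3, pvTiers]
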